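-- pv_equiv track=rewrite | github.com/idiomaticrefactoring/IdiomatizationLLM | code/ours/loop_else/loop_else_code_instr_node.py | divide_code
-- ===== SOURCE A (Python) =====
-- def divide_code(code):
--         # Split the code into lines
--         lines = code.split('\n')
--
--         # Initialize the symbol mapping and the new code
--         symbol_mapping = {}
--         new_code = ''
--
--         # Initialize the current block level and the current block code
--         current_block_level = 0
--         current_block_code = ''
--
--         # Iterate over each line of code
--         for line in lines:
--             # If the line is not indented
--             if not line.startswith(' '):
--                 # If there is a current block code, add it to the symbol mapping
--                 if current_block_code:
--                     symbol_mapping[f'zj{len(symbol_mapping) + 1}'] = current_block_code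
--                     new_code += f'zj{len(symbol_mapping)}\n'
--                     current_block_code = ''
--
--                 # Add the current line to the new code
--                 new_code += f'{line}\n'
--
--                 # Reset the current block level
--                 current_block_level = 0
--             else:
--                 # If the current block level is zero, set it to the indentation level of the current line
--                 if current_block_level == 0:
--                     current_block_level = len(line) - len(line.lstrip())
--
--                 # Add the current line to the current block code
--                 current_block_code += f'{line}\n'
--
--         # If there is a current block code, add it to the symbol mapping
--         if current_block_code:
--             symbol_mapping[f'zj{len(symbol_mapping) + 1}'] = current_block_code
--             new_code += f'zj{len(symbol_mapping)}\n'
--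
--         # Return the new code and the symbol mapping
--         return new_code, symbol_mapping
-- ===== SOURCE B (Python) =====
-- def divide_code(code):
--     lines = code.split('\n')
--     parts = []
--     mapping = []
--     i = 0
--     n = 0
--     while i < len(lines):
--         if lines[i].startswith(' '):
--             j = i
--             while j < len(lines) and lines[j].startswith(' '):
--                 j += 1
--             n += 1
--             mapping.append((f'zj{n}', ''.join(l + '\n' for l in lines[i:j])))
--             parts.append(f'zj{n}\n')
--             i = j
--         else:
--             parts.append(lines[i] + '\n')
--             i += 1
--     return ''.join(parts), dict(mapping)
-- ===== Notes on version B (the rewrite author's own statement) =====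
-- stated objective: alternative
-- what changed: Replaces A's line-by-line loop with a pending-block accumulator, flush flag and trailing flush by a two-pointer scan that consumes each maximal indented run at once, collecting output pieces and mapping pairs in lists joined at the end.
import Mathlib
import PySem

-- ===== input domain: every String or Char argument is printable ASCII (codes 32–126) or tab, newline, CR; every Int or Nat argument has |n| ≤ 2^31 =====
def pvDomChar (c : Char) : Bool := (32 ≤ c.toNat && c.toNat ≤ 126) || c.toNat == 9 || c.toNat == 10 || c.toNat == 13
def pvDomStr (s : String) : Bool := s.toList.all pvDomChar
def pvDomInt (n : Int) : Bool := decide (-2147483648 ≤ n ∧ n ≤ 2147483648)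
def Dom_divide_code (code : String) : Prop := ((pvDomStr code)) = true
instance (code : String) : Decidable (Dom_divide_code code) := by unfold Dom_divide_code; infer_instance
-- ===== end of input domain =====

-- B replaces A's line-by-line flush-flag loop by a two-pointer scan over maximal indented runs
-- (objective: simpler/alternative; same cost); return value only, neither version mutates its argument.

-- ===== PORT A =====
-- loop body of A: state = (symbol_mapping, new_code, current_block_level, current_block_code)
def divideStep (st : PySem.Dict String String × String × Int × String) (line : String) :
    PySem.Dict String String × String × Int × String :=
  let (sm, nc, lvl, cbc) := st
  if !(PySem.Str.startswith line " ") then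
    let (sm, nc) :=
      if cbc ≠ "" then
        let sm' := sm.insert ("zj" ++ PySem.Int.toStr ((sm.size : Int) + 1)) cbc
        (sm', nc ++ ("zj" ++ PySem.Int.toStr ((sm'.size : Int)) ++ "\n"))
      else (sm, nc)
    (sm, nc ++ (line ++ "\n"), 0, "")
  else
    let lvl := if lvl == 0 then (PySem.Str.len line - PySem.Str.len (PySem.Str.lstrip line)) else lvl
    (sm, nc, lvl, cbc ++ (line ++ "\n"))

def divide_code (code : String) : String × (List (String × String)) :=
  let lines := (PySem.Str.split? code "\n").getD []   -- sep "\n" ≠ "": split? is `some` here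
  let st := lines.foldl divideStep (PySem.Dict.empty, "", (0 : Int), "")
  let (sm, nc, _, cbc) := st
  if cbc ≠ "" then
    let sm' := sm.insert ("zj" ++ PySem.Int.toStr ((sm.size : Int) + 1)) cbc
    (nc ++ ("zj" ++ PySem.Int.toStr ((sm'.size : Int)) ++ "\n"), sm'.items)
  else (nc, sm.items)

-- ===== PORT B =====
-- B's while loop: two pointers; an indented head consumes its whole maximal run at once
def goB : List String → Nat → String → List (String × String) → String × List (String × String)
  | [], _, nc, sm => (nc, sm)
  | l :: rest, n, nc, sm =>
    if PySem.Str.startswith l " " then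
      let run := (l :: rest).takeWhile (fun s => PySem.Str.startswith s " ")
      let rest' := rest.dropWhile (fun s => PySem.Str.startswith s " ")
      let key := "zj" ++ PySem.Int.toStr ((n + 1 : Nat) : Int)
      goB rest' (n + 1) (nc ++ (key ++ "\n"))
        (sm ++ [(key, run.foldl (fun a s => a ++ (s ++ "\n")) "")])
    else
      goB rest n (nc ++ (l ++ "\n")) sm
  termination_by ls => ls.length
  decreasing_by
  · have := List.length_dropWhile_le (fun s => PySem.Str.startswith s " ") rest
    simp only [List.length_cons]; omega
  · simp only [List.length_cons]; omega

def divide_code_alt (code : String) : String × (List (String × String)) :=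
  goB ((PySem.Str.split? code "\n").getD []) 0 "" []

-- ===== PRECONDITION & SPEC =====
def Spec_divide_code (code : String) (out : String × (List (String × String))) : Prop := out = divide_code_alt code
instance (code : String) (out : String × (List (String × String))) : Decidable (Spec_divide_code code out) := by unfold Spec_divide_code; infer_instance

-- ===== CLAIM (what is proved, stated in full; the proofs are below) =====
def Claim_equal_divide_code : Prop := ∀ (code : String), Dom_divide_code code → Spec_divide_code code (divide_code code)

-- ===== LEMMAS AND PROOFS =====

-- decimal decoding, to obtain injectivity of `str(n)` numbering of the zj symbols
def pvDecDigit (c : Char) : Nat := c.toNat - 48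
def pvDec (cs : List Char) : Nat := cs.foldl (fun a c => a * 10 + pvDecDigit c) 0

theorem pvDecDigit_digitChar (d : Nat) (h : d < 10) : pvDecDigit (Nat.digitChar d) = d := by
  interval_cases d <;> rfl

theorem toDigitsCore_append (f : Nat) : ∀ (n : Nat) (l : List Char),
    Nat.toDigitsCore 10 f n l = Nat.toDigitsCore 10 f n [] ++ l := by
  induction f with
  | zero => intro n l; simp [Nat.toDigitsCore]
  | succ f ih =>
    intro n l
    simp only [Nat.toDigitsCore]
    by_cases h : n / 10 = 0
    · simp [h]
    · simp only [h, if_false]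
      rw [ih (n / 10) ((n % 10).digitChar :: l), ih (n / 10) [(n % 10).digitChar]]
      simp

theorem toDigitsCore_succ (f n : Nat) :
    Nat.toDigitsCore 10 (f + 1) n []
      = if n / 10 = 0 then [(n % 10).digitChar]
        else Nat.toDigitsCore 10 f (n / 10) [(n % 10).digitChar] := by
  conv_lhs => rw [Nat.toDigitsCore]

theorem pvDec_toDigitsCore : ∀ n f : Nat, n ≤ f →
    pvDec (Nat.toDigitsCore 10 (f + 1) n []) = n := by
  intro n
  induction n using Nat.strong_induction_on with
  | _ n ih =>
    intro f hf
    rw [toDigitsCore_succ]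
    by_cases h : n / 10 = 0
    · rw [if_pos h]
      have h2 : n % 10 = n := by omega
      have := pvDecDigit_digitChar (n % 10) (by omega)
      simp only [pvDec, List.foldl_cons, List.foldl_nil, this]
      omega
    · obtain ⟨f', rfl⟩ : ∃ f', f = f' + 1 := ⟨f - 1, by omega⟩
      rw [if_neg h, toDigitsCore_append]
      have hlt : n / 10 < n := Nat.div_lt_self (by omega) (by omega)
      have hrec := ih (n / 10) hlt f' (by omega)
      simp only [pvDec, List.foldl_append, List.foldl_cons, List.foldl_nil] at *
      rw [hrec, pvDecDigit_digitChar (n % 10) (by omega)]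
      omega

theorem toDigits_ten_inj {m k : Nat} (h : Nat.toDigits 10 m = Nat.toDigits 10 k) : m = k := by
  have hm := pvDec_toDigitsCore m m le_rfl
  have hk := pvDec_toDigitsCore k k le_rfl
  unfold Nat.toDigits at h
  rw [h] at hm
  rw [hk] at hm
  omega

theorem key_inj {i j : Nat} (h : "zj" ++ PySem.Int.toStr (i : Int) = "zj" ++ PySem.Int.toStr (j : Int)) :
    i = j := by
  have h2 := congrArg String.toList h
  rw [String.toList_append, String.toList_append, PySem.Int.toList_toStr, PySem.Int.toList_toStr] at h2
  have h3 := List.append_cancel_left h2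
  simp only [PySem.Int.toChars] at h3
  have hi : ¬ ((i : Int) < 0) := Int.not_lt.mpr (Int.natCast_nonneg i)
  have hj : ¬ ((j : Int) < 0) := Int.not_lt.mpr (Int.natCast_nonneg j)
  rw [if_neg hi, if_neg hj] at h3
  simp only [Int.toNat_natCast] at h3
  exact toDigits_ten_inj h3

-- the final flush of A, applied to the fold state
def flushA (st : PySem.Dict String String × String × Int × String) : String × List (String × String) :=
  let (sm, nc, _, cbc) := st
  if cbc ≠ "" then
    let sm' := sm.insert ("zj" ++ PySem.Int.toStr ((sm.size : Int) + 1)) cbc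
    (nc ++ ("zj" ++ PySem.Int.toStr ((sm'.size : Int)) ++ "\n"), sm'.items)
  else (nc, sm.items)

-- A's dict only ever holds keys zj1 .. zj(size)
def InvA (sm : PySem.Dict String String) : Prop :=
  ∀ k ∈ sm.keys, ∃ i : Nat, 1 ≤ i ∧ i ≤ sm.size ∧ k = "zj" ++ PySem.Int.toStr (i : Int)

theorem fresh_key (sm : PySem.Dict String String) (h : InvA sm) :
    sm.contains ("zj" ++ PySem.Int.toStr ((sm.size : Int) + 1)) = false := by
  rw [PySem.Dict.contains_eq_decide_mem_keys]
  simp only [decide_eq_false_iff_not]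
  intro hmem
  obtain ⟨i, h1, h2, h3⟩ := h _ hmem
  have : ((sm.size : Int) + 1) = ((sm.size + 1 : Nat) : Int) := by push_cast; ring
  rw [this] at h3
  have := key_inj h3.symm
  omega

theorem append_line_ne_empty (run : List String) : ∀ (a s : String),
    run.foldl (fun a s => a ++ (s ++ "\n")) (a ++ (s ++ "\n")) ≠ "" := by
  induction run with
  | nil =>
    intro a s h
    have := congrArg String.toList h
    simp [String.toList_append] at this
  | cons x xs ih =>
    intro a s
    simp only [List.foldl_cons]
    exact ih _ _

theorem run_fold (run : List String) : ∀ (sm : PySem.Dict String String) (nc : String)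
    (lvl : Int) (cbc : String), (∀ s ∈ run, PySem.Str.startswith s " " = true) →
    ∃ lvl', run.foldl divideStep (sm, nc, lvl, cbc)
      = (sm, nc, lvl', run.foldl (fun a s => a ++ (s ++ "\n")) cbc) := by
  induction run with
  | nil => intro sm nc lvl cbc _; exact ⟨lvl, rfl⟩
  | cons x xs ih =>
    intro sm nc lvl cbc hall
    have hx : PySem.Str.startswith x " " = true := hall x (List.mem_cons_self)
    simp only [List.foldl_cons, divideStep, hx, Bool.not_true, Bool.false_eq_true, if_false]
    exact ih _ _ _ _ (fun s hs => hall s (List.mem_cons_of_mem _ hs))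

theorem cast_size (n : Nat) : ((n : Int) + 1) = ((n + 1 : Nat) : Int) := by push_cast; ring

theorem InvA_insert (sm : PySem.Dict String String) (h : InvA sm) (cbc : String) :
    InvA (sm.insert ("zj" ++ PySem.Int.toStr ((sm.size : Int) + 1)) cbc) := by
  intro k hk
  rw [PySem.Dict.keys_insert_of_not_contains sm cbc (fresh_key sm h)] at hk
  rw [PySem.Dict.size_insert, fresh_key sm h]
  simp only [Bool.false_eq_true, if_false]
  rcases List.mem_append.mp hk with hk | hk
  · obtain ⟨i, h1, h2, h3⟩ := h k hk
    exact ⟨i, h1, by omega, h3⟩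
  · refine ⟨sm.size + 1, by omega, le_rfl, ?_⟩
    simp only [List.mem_singleton] at hk
    rw [hk, cast_size]

theorem size_insert_fresh (sm : PySem.Dict String String) (h : InvA sm) (cbc : String) :
    (sm.insert ("zj" ++ PySem.Int.toStr ((sm.size : Int) + 1)) cbc).size = sm.size + 1 := by
  rw [PySem.Dict.size_insert, fresh_key sm h]
  simp

theorem main_lemma (N : Nat) : ∀ (ls : List String), ls.length ≤ N →
    ∀ (sm : PySem.Dict String String) (nc : String) (lvl : Int), InvA sm →
    flushA (ls.foldl divideStep (sm, nc, lvl, "")) = goB ls sm.size nc sm.items := by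
  induction N with
  | zero =>
    intro ls hl sm nc lvl _
    have h0 : ls = [] := List.eq_nil_of_length_eq_zero (by omega)
    subst h0
    simp [flushA, goB]
  | succ N ih =>
    intro ls hl sm nc lvl hInv
    match ls with
    | [] => simp [flushA, goB]
    | l :: rest =>
      by_cases hl0 : PySem.Str.startswith l " " = true
      · -- indented head: A accumulates the run into current_block_code
        have hsplit : l :: rest
            = (l :: rest).takeWhile (fun s => PySem.Str.startswith s " ")
              ++ rest.dropWhile (fun s => PySem.Str.startswith s " ") := by
          conv_lhs => rw [← List.takeWhile_append_dropWhile
            (p := fun s => PySem.Str.startswith s " ") (l := l :: rest)]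
          rw [List.dropWhile_cons_of_pos (p := fun s => PySem.Str.startswith s " ") hl0]
        have hrun1 : (l :: rest).takeWhile (fun s => PySem.Str.startswith s " ")
            = l :: rest.takeWhile (fun s => PySem.Str.startswith s " ") :=
          List.takeWhile_cons_of_pos hl0
        set run := (l :: rest).takeWhile (fun s => PySem.Str.startswith s " ") with hrundef
        set rest' := rest.dropWhile (fun s => PySem.Str.startswith s " ") with hrestdef
        obtain ⟨lvl', hrun⟩ := run_fold run sm nc lvl ""
          (fun s hs => List.mem_takeWhile_imp (p := fun s => PySem.Str.startswith s " ") hs)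
        set Bv := run.foldl (fun a s => a ++ (s ++ "\n")) "" with hBdef
        have hBne : Bv ≠ "" := by
          rw [hBdef, hrun1, List.foldl_cons]
          have h0 : ("" : String) ++ (l ++ "\n") = "" ++ (l ++ "\n") := rfl
          exact append_line_ne_empty _ "" l
        have hlen : run.length + rest'.length = rest.length + 1 := by
          have := congrArg List.length hsplit
          simpa using this.symm
        have hrunpos : 1 ≤ run.length := by rw [hrun1]; simp
        have hfold : (l :: rest).foldl divideStep (sm, nc, lvl, "")
            = rest'.foldl divideStep (sm, nc, lvl', Bv) := by
          conv_lhs => rw [hsplit]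
          rw [List.foldl_append, hrun]
        have hgoB : goB (l :: rest) sm.size nc sm.items
            = goB rest' (sm.size + 1)
                (nc ++ (("zj" ++ PySem.Int.toStr ((sm.size + 1 : Nat) : Int)) ++ "\n"))
                (sm.items ++ [("zj" ++ PySem.Int.toStr ((sm.size + 1 : Nat) : Int), Bv)]) := by
          rw [goB, if_pos hl0]
        rw [hfold, hgoB]
        have hkey : ("zj" ++ PySem.Int.toStr ((sm.size + 1 : Nat) : Int))
            = ("zj" ++ PySem.Int.toStr ((sm.size : Int) + 1)) := by rw [cast_size]
        match hrest : rest' with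
        | [] =>
          simp only [List.foldl_nil, flushA, goB]
          rw [if_pos hBne,
            PySem.Dict.items_insert_of_not_contains sm Bv (fresh_key sm hInv),
            size_insert_fresh sm hInv Bv, hkey]
        | h :: t =>
          have hh : PySem.Str.startswith h " " = false := by
            have hne : List.dropWhile (fun s => PySem.Str.startswith s " ") rest ≠ [] := by
              rw [← hrestdef]; simp
            have h2 := List.head_dropWhile_not (fun s => PySem.Str.startswith s " ")
              (l := rest) hne
            have h4 : (List.dropWhile (fun s => PySem.Str.startswith s " ") rest).head?
                = some h := by rw [← hrestdef]; rfl
            rw [List.head?_eq_some_head hne] at h4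
            have h6 : (List.dropWhile (fun s => PySem.Str.startswith s " ") rest).head hne
                = h := by injection h4
            rw [h6] at h2
            exact h2
          rw [List.foldl_cons]
          have hstep : divideStep (sm, nc, lvl', Bv) h
              = (sm.insert ("zj" ++ PySem.Int.toStr ((sm.size : Int) + 1)) Bv,
                 (nc ++ ("zj" ++ PySem.Int.toStr
                   (((sm.insert ("zj" ++ PySem.Int.toStr ((sm.size : Int) + 1)) Bv).size : Int))
                   ++ "\n")) ++ (h ++ "\n"), 0, "") := by
            simp only [divideStep, hh, Bool.not_false, if_true, if_pos hBne]
          rw [hstep]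
          have ht : t.length ≤ N := by
            simp only [List.length_cons] at hlen hl
            omega
          have := ih t ht (sm.insert ("zj" ++ PySem.Int.toStr ((sm.size : Int) + 1)) Bv)
            ((nc ++ ("zj" ++ PySem.Int.toStr
              (((sm.insert ("zj" ++ PySem.Int.toStr ((sm.size : Int) + 1)) Bv).size : Int))
              ++ "\n")) ++ (h ++ "\n")) 0 (InvA_insert sm hInv Bv)
          rw [this]
          rw [goB, if_neg (by simpa using hh)]
          rw [PySem.Dict.items_insert_of_not_contains sm Bv (fresh_key sm hInv),
            size_insert_fresh sm hInv Bv, hkey]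
      · -- non-indented head
        rw [List.foldl_cons]
        have hl0' : PySem.Str.startswith l " " = false := eq_false_of_ne_true hl0
        have hstep : divideStep (sm, nc, lvl, "") l = (sm, nc ++ (l ++ "\n"), 0, "") := by
          simp only [divideStep]
          rw [hl0']
          rfl
        rw [hstep]
        have := ih rest (by simpa using Nat.le_of_succ_le_succ hl) sm (nc ++ (l ++ "\n")) 0 hInv
        rw [this, goB, if_neg (by simpa using hl0)]

theorem InvA_empty : InvA PySem.Dict.empty := by
  intro k hk
  simp [PySem.Dict.keys_empty] at hk

-- ===== VERDICT (by name: the statement is the Claim_ definition above) =====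
theorem divide_code_spec : Claim_equal_divide_code := by
  intro code _
  unfold Spec_divide_code divide_code divide_code_alt
  have := main_lemma ((PySem.Str.split? code "\n").getD []).length
    ((PySem.Str.split? code "\n").getD []) le_rfl PySem.Dict.empty "" 0 InvA_empty
  simp only [flushA] at this
  simpa [PySem.Dict.size_empty] using this
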